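-- pv_equiv track=rewrite | github.com/sittingthyme/poker-engine-2026 | scripts/analyze_match_csv.py | preflop_only_tail_len
-- ===== SOURCE A (Python) =====
-- POSTFLOP = {"Flop", "Turn", "River"}
--
-- def preflop_only_tail_len(streets_map: dict[int, set[str]], num_hands: int) -> int:
--     """Longest suffix of hands with no Flop/Turn/River rows in the log."""
--     n = 0
--     for h in range(num_hands - 1, -1, -1):
--         st = streets_map.get(h, set())
--         if st & POSTFLOP:
--             break
--         n += 1
--     return n
-- ===== SOURCE B (Python) =====
-- POSTFLOP = {"Flop", "Turn", "River"}
--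
-- def preflop_only_tail_len(streets_map, num_hands):
--     """Longest suffix of hands with no Flop/Turn/River rows in the log."""
--     hits = [h for h in range(num_hands) if streets_map.get(h, set()) & POSTFLOP]
--     last = hits[-1] if hits else -1
--     return max(0, num_hands - 1 - last)
-- ===== Notes on version B (the rewrite author's own statement) =====
-- stated objective: alternative
-- what changed: Replaces the backward counting loop with early break by building the list of postflop hand indices via a forward comprehension and computing the tail length from its last element with the closed formula max(0, num_hands - 1 - last).
import Mathlib
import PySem

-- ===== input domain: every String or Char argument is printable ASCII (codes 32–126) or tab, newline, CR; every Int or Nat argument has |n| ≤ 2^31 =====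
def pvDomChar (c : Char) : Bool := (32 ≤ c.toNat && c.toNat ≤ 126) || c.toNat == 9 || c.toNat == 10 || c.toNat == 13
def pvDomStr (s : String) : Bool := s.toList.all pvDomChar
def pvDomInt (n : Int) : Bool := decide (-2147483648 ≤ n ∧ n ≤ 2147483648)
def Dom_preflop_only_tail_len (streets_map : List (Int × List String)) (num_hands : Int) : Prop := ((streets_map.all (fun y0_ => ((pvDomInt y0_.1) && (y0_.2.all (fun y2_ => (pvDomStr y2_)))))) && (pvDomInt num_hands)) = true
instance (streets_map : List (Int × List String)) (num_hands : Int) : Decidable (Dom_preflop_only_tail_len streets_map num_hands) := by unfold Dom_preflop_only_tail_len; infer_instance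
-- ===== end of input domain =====

-- B replaces A's backward counting loop with early break by a forward comprehension that
-- collects the postflop hand indices and the closed formula max(0, num_hands-1-last) (objective: alternative).

-- module constant POSTFLOP = {"Flop", "Turn", "River"} (shared by both Pythons)
def POSTFLOP : List String := ["Flop", "Turn", "River"]

-- truthiness of `st & POSTFLOP` (intersection of two sets is non-empty); shared by both ports
def postHit (st : List String) : Bool := st.any (fun s => POSTFLOP.contains s)

-- ===== PORT A =====
-- A's loop: for h in range(num_hands-1, -1, -1), break on postflop, else n += 1
def pvALoop (streets_map : List (Int × List String)) (h : Int) (n : Int) : Int :=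
  if hge : 0 ≤ h then
    -- st = streets_map.get(h, set()) inlined into the test
    if postHit (((PySem.Dict.mk streets_map).get? h).getD []) then n
    else pvALoop streets_map (h - 1) (n + 1)
  else n
termination_by (h + 1).toNat
decreasing_by omega

def preflop_only_tail_len (streets_map : List (Int × List String)) (num_hands : Int) : Int :=
  pvALoop streets_map (num_hands - 1) 0

-- ===== PORT B =====
-- hits = [h for h in range(num_hands) if streets_map.get(h, set()) & POSTFLOP]
-- last = hits[-1] if hits else -1; return max(0, num_hands - 1 - last)
def preflop_only_tail_len_alt (streets_map : List (Int × List String)) (num_hands : Int) : Int :=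
  let hits := (PySem.List.pyRange 0 num_hands 1).filter
    (fun h => postHit (((PySem.Dict.mk streets_map).get? h).getD []))
  let last := hits.getLast?.getD (-1)
  max 0 (num_hands - 1 - last)

-- ===== PRECONDITION & SPEC =====
def Spec_preflop_only_tail_len (streets_map : List (Int × List String)) (num_hands : Int) (out : Int) : Prop := out = preflop_only_tail_len_alt streets_map num_hands
instance (streets_map : List (Int × List String)) (num_hands : Int) (out : Int) : Decidable (Spec_preflop_only_tail_len streets_map num_hands out) := by unfold Spec_preflop_only_tail_len; infer_instance

-- ===== CLAIM =====
def Claim_equal_preflop_only_tail_len : Prop := ∀ (streets_map : List (Int × List String)) (num_hands : Int), Dom_preflop_only_tail_len streets_map num_hands → Spec_preflop_only_tail_len streets_map num_hands (preflop_only_tail_len streets_map num_hands)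

-- ===== LEMMAS AND PROOFS =====

-- A's loop accumulator is additive
theorem pvALoop_add (m : List (Int × List String)) (h n : Int) :
    pvALoop m h n = n + pvALoop m h 0 := by
  induction hk : (h + 1).toNat using Nat.strong_induction_on generalizing h n with
  | _ k ih =>
    rw [pvALoop.eq_def]; conv_rhs => rw [pvALoop.eq_def]
    split
    · next hge =>
      split
      · simp
      · rw [ih h.toNat (by omega) (h - 1) (n + 1) (by omega),
            ih h.toNat (by omega) (h - 1) (0 + 1) (by omega)]
        ring
    · simp

-- main equivalence, by induction on num_hands
theorem main_eq (m : List (Int × List String)) (nh : Int) :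
    preflop_only_tail_len m nh = preflop_only_tail_len_alt m nh := by
  induction hk : nh.toNat using Nat.strong_induction_on generalizing nh with
  | _ k ih =>
    unfold preflop_only_tail_len preflop_only_tail_len_alt
    by_cases hpos : 0 < nh
    · have hsplit : PySem.List.pyRange 0 nh 1
          = PySem.List.pyRange 0 (nh - 1) 1 ++ [nh - 1] := by
        have h := PySem.List.pyRange_one_succ_right (a := 0) (b := nh - 1) (by omega)
        rw [show nh - 1 + 1 = nh by omega] at h
        exact h
      rw [hsplit, List.filter_append]
      rw [pvALoop.eq_def, dif_pos (show (0:Int) ≤ nh - 1 by omega)]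
      by_cases hp : postHit (((PySem.Dict.mk m).get? (nh - 1)).getD []) = true
      · rw [if_pos hp]
        have hone : List.filter (fun h => postHit (((PySem.Dict.mk m).get? h).getD [])) [nh - 1]
            = [nh - 1] := by simp [hp]
        simp only [hone, List.getLast?_concat, Option.getD_some]
        omega
      · rw [if_neg hp]
        have hone : List.filter (fun h => postHit (((PySem.Dict.mk m).get? h).getD [])) [nh - 1]
            = [] := by simp [hp]
        simp only [hone, List.append_nil]
        rw [pvALoop_add]
        have hrec := ih (nh - 1).toNat (by omega) (nh - 1) rfl
        unfold preflop_only_tail_len preflop_only_tail_len_alt at hrec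
        -- bound: the last collected index is at most nh - 2
        set hits := (PySem.List.pyRange 0 (nh - 1) 1).filter
          (fun h => postHit (((PySem.Dict.mk m).get? h).getD [])) with hhits
        have hlast : hits.getLast?.getD (-1) ≤ nh - 2 := by
          cases hg : hits.getLast? with
          | none => simp; omega
          | some x =>
            have hx : x ∈ hits := List.mem_of_getLast? hg
            have := (PySem.List.mem_pyRange_one).1 (List.mem_of_mem_filter hx)
            simp; omega
        simp only [show nh - 1 - 1 = nh - 2 by omega] at hrec ⊢
        omega
    · rw [pvALoop.eq_def, dif_neg (show ¬ (0:Int) ≤ nh - 1 by omega)]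
      rw [PySem.List.pyRange_one_eq_nil (by omega)]
      simp; omega

-- ===== VERDICT =====
theorem preflop_only_tail_len_spec : Claim_equal_preflop_only_tail_len := by
  intro m nh _
  unfold Spec_preflop_only_tail_len
  exact main_eq m nh
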